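-- pv_equiv track=rewrite | github.com/Prior-Lab-Durham-University/carbonara | CarbonaraDataTools.py | parse_secondary_structure_chainwise
-- ===== SOURCE A (Python) =====
-- from typing import List, Set
-- from typing import List, Set
-- from typing import List, Tuple
--
-- def parse_secondary_structure_chainwise(ss_chains: List[str]) -> List[Tuple[int, str, int, int]]:
--     """
--     Parses multiple secondary structure strings into segments across chains.
--     Each segment is (segment_id, symbol, start, end) where [start:end] is the local position in the chain.
--     Segment IDs are globally unique and increment continuously across chains.
--     """
--     segments = []
--     current_id = 0
--     for chain_ss in ss_chains:
--         i = 0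
--         while i < len(chain_ss):
--             symbol = chain_ss[i]
--             start = i
--             while i < len(chain_ss) and chain_ss[i] == symbol:
--                 i += 1
--             end = i
--             segments.append((current_id, symbol, start, end))
--             current_id += 1
--     return segments
-- ===== SOURCE B (Python) =====
-- from typing import List, Tuple
--
-- def parse_secondary_structure_chainwise(ss_chains: List[str]) -> List[Tuple[int, str, int, int]]:
--     # Staged approach: find the change points (positions where adjacent characters differ),
--     # build the symbol/start/end columns from them, zip the columns, and finally assign
--     # global ids with a single enumerate instead of maintaining a running counter.
--     triples = []
--     for s in ss_chains:
--         change = [(i + 1, b) for i, (a, b) in enumerate(zip(s, s[1:])) if a != b]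
--         symbols = ([s[0]] if s else []) + [c for _, c in change]
--         starts = ([0] if s else []) + [p for p, _ in change]
--         ends = [p for p, _ in change] + ([len(s)] if s else [])
--         triples.extend(zip(symbols, starts, ends))
--     return [(i, sym, st, en) for i, (sym, st, en) in enumerate(triples)]
-- ===== Notes on version B (the rewrite author's own statement) =====
-- stated objective: alternative
-- what changed: Replaces A's index-driven scan (nested while loops with a running segment-id counter) by a staged pipeline: compute the change points where adjacent characters differ, build the symbol/start/end columns from them, zip the columns, and assign global ids with one final enumerate.
import Mathlib
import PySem

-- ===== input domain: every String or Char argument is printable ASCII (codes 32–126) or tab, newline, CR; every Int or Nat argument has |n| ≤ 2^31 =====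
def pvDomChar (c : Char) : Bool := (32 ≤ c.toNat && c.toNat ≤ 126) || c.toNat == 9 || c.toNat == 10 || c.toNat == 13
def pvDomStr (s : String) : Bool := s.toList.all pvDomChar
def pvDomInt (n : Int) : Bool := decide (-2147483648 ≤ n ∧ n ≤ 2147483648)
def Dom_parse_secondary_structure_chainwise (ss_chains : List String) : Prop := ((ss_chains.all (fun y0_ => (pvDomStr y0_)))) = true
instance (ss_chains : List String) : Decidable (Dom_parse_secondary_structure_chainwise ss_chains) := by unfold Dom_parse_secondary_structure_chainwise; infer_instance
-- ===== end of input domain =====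

-- B replaces A's index-driven run scan (nested while loops with a running id counter) by a
-- staged pipeline: find change points between adjacent characters, build the symbol/start/end
-- columns, zip them, and assign global ids by one final enumerate; idiomatic, same cost.

-- ===== PORT A =====
-- inner while loop: 'while i < len(chain_ss) and chain_ss[i] == symbol: i += 1',
-- entered after the first character (chain_ss[start]) was consumed.
def takeRunA (symbol : Char) : List Char → Nat → List Char × Nat
  | [], i => ([], i)
  | c :: cs, i => if c = symbol then takeRunA symbol cs (i + 1) else (c :: cs, i)

theorem takeRunA_len (symbol : Char) : ∀ (l : List Char) (i : Nat), (takeRunA symbol l i).1.length ≤ l.length := by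
  intro l
  induction l with
  | nil => intro i; simp [takeRunA]
  | cons c cs ih =>
    intro i
    by_cases h : c = symbol
    · simp only [takeRunA, if_pos h]
      exact le_trans (ih (i + 1)) (Nat.le_succ _)
    · simp [takeRunA, if_neg h]

-- outer while loop over one chain: state (i, current_id, segments)
def chainA : List Char → Nat → Int → List (Int × String × Int × Int) → Int × List (Int × String × Int × Int)
  | [], _, current_id, segments => (current_id, segments)
  | c :: cs, i, current_id, segments =>
    let r := takeRunA c cs (i + 1)
    chainA r.1 r.2 (current_id + 1)
      (segments ++ [(current_id, String.singleton c, (i : Int), (r.2 : Int))])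
termination_by cs _ _ _ => cs.length
decreasing_by
  simp only [List.length_cons]
  exact Nat.lt_succ_of_le (takeRunA_len c cs (i + 1))

def parse_secondary_structure_chainwise (ss_chains : List String) : List (Int × String × Int × Int) :=
  (ss_chains.foldl (fun st chain_ss => chainA chain_ss.toList 0 st.1 st.2)
    ((0 : Int), ([] : List (Int × String × Int × Int)))).2

-- ===== PORT B =====
-- 'change = [(i + 1, b) for i, (a, b) in enumerate(zip(s, s[1:])) if a != b]'
def chgB (s : List Char) : List (Int × Char) :=
  (PySem.List.enumerate (s.zip s.tail) 0).filterMap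
    (fun p => if p.2.1 ≠ p.2.2 then some (p.1 + 1, p.2.2) else none)

-- body of the per-chain stage: columns symbols/starts/ends, then zip
def chainTriplesB (s : List Char) : List (Char × Int × Int) :=
  let change := chgB s
  let symbols := (match s with | [] => [] | c :: _ => [c]) ++ change.map (·.2)
  let starts := (match s with | [] => ([] : List Int) | _ :: _ => [0]) ++ change.map (·.1)
  let ends := change.map (·.1) ++ (match s with | [] => [] | _ :: _ => [(s.length : Int)])
  List.zipWith3 (fun a b c => (a, b, c)) symbols starts ends

def parse_secondary_structure_chainwise_alt (ss_chains : List String) : List (Int × String × Int × Int) :=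
  let triples := ss_chains.foldl (fun acc s => acc ++ chainTriplesB s.toList) []
  (PySem.List.enumerate triples 0).map
    (fun p => (p.1, String.singleton p.2.1, p.2.2.1, p.2.2.2))

-- ===== PRECONDITION & SPEC =====
def Spec_parse_secondary_structure_chainwise (ss_chains : List String) (out : List (Int × String × Int × Int)) : Prop := out = parse_secondary_structure_chainwise_alt ss_chains
instance (ss_chains : List String) (out : List (Int × String × Int × Int)) : Decidable (Spec_parse_secondary_structure_chainwise ss_chains out) := by unfold Spec_parse_secondary_structure_chainwise; infer_instance

-- ===== CLAIM (what is proved, stated in full; the proofs are below) =====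
def Claim_equal_parse_secondary_structure_chainwise : Prop := ∀ (ss_chains : List String), Dom_parse_secondary_structure_chainwise ss_chains → Spec_parse_secondary_structure_chainwise ss_chains (parse_secondary_structure_chainwise ss_chains)

-- ===== LEMMAS AND PROOFS =====

-- run decomposition of a chain: the common normal form both programs are reduced to
def trips : List Char → Nat → List (Char × Int × Int)
  | [], _ => []
  | c :: cs, i =>
    (c, (i : Int), ((i + 1 + (cs.takeWhile (· == c)).length : Nat) : Int)) ::
      trips (cs.dropWhile (· == c)) (i + 1 + (cs.takeWhile (· == c)).length)
termination_by cs _ => cs.length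
decreasing_by
  simp only [List.length_cons]
  exact Nat.lt_succ_of_le (List.length_dropWhile_le _ _)

theorem takeRunA_eq (symbol : Char) : ∀ (l : List Char) (i : Nat),
    takeRunA symbol l i = (l.dropWhile (· == symbol), i + (l.takeWhile (· == symbol)).length) := by
  intro l
  induction l with
  | nil => intro i; simp [takeRunA]
  | cons c cs ih =>
    intro i
    by_cases h : c = symbol
    · subst h
      rw [takeRunA, if_pos rfl, ih]
      rw [List.dropWhile_cons_of_pos (by simp), List.takeWhile_cons_of_pos (by simp)]
      simp only [List.length_cons, Prod.mk.injEq, true_and]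
      omega
    · have hb : (c == symbol) = false := by simp [h]
      simp [takeRunA, if_neg h, List.dropWhile, List.takeWhile, hb]

-- A-side characterisation: chainA produces the enumerated run triples
theorem chainA_eq_trips : ∀ (n : Nat) (cs : List Char), cs.length ≤ n →
    ∀ (i : Nat) (id : Int) (acc : List (Int × String × Int × Int)),
    chainA cs i id acc =
      (id + (trips cs i).length,
       acc ++ (PySem.List.enumerate (trips cs i) id).map
          (fun p => (p.1, String.singleton p.2.1, p.2.2.1, p.2.2.2))) := by
  intro n
  induction n with
  | zero =>
    intro cs hlen i id acc
    have : cs = [] := List.eq_nil_of_length_eq_zero (Nat.le_zero.mp hlen)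
    subst this
    simp [chainA, trips, PySem.List.enumerate_nil]
  | succ n ih =>
    intro cs hlen i id acc
    cases cs with
    | nil => simp [chainA, trips, PySem.List.enumerate_nil]
    | cons c cs' =>
      rw [chainA, takeRunA_eq]
      have hdrop : (cs'.dropWhile (· == c)).length ≤ n := by
        have h1 := List.length_dropWhile_le (· == c) cs'
        have h2 : cs'.length ≤ n := by simpa using Nat.lt_succ_iff.mp (Nat.lt_of_lt_of_le (by simp) hlen)
        omega
      rw [ih _ hdrop]
      rw [trips]
      rw [PySem.List.enumerate_cons]
      simp only [List.length_cons, List.map_cons, List.append_assoc, List.singleton_append]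
      rw [Prod.mk.injEq]
      exact ⟨by push_cast; ring, rfl⟩

-- chgB with an arbitrary enumerate offset, characterised run by run
def chgFrom (s : List Char) (k : Int) : List (Int × Char) :=
  (PySem.List.enumerate (s.zip s.tail) k).filterMap
    (fun p => if p.2.1 ≠ p.2.2 then some (p.1 + 1, p.2.2) else none)

theorem chgFrom_step (a b : Char) (rest : List Char) (k : Int) :
    chgFrom (a :: b :: rest) k =
      (if a ≠ b then [(k + 1, b)] else []) ++ chgFrom (b :: rest) (k + 1) := by
  unfold chgFrom
  simp only [List.tail_cons, List.zip_cons_cons, PySem.List.enumerate_cons, List.filterMap_cons]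
  by_cases h : a = b
  · simp [h]
  · simp [h]

theorem chgFrom_run (c : Char) : ∀ (cs : List Char) (k : Int),
    chgFrom (c :: cs) k =
      (match cs.dropWhile (· == c) with
       | [] => []
       | d :: ds => (k + (cs.takeWhile (· == c)).length + 1, d) ::
           chgFrom (d :: ds) (k + (cs.takeWhile (· == c)).length + 1)) := by
  intro cs
  induction cs with
  | nil => intro k; simp [chgFrom, PySem.List.enumerate_nil]
  | cons b bs ih =>
    intro k
    by_cases h : b = c
    · subst h
      rw [chgFrom_step, ih (k + 1),
          List.dropWhile_cons_of_pos (by simp), List.takeWhile_cons_of_pos (by simp)]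
      cases hd : List.dropWhile (fun x => x == b) bs with
      | nil => simp
      | cons d ds =>
        have h1 : k + 1 + ((List.takeWhile (fun x => x == b) bs).length : Int) + 1
            = k + (((List.takeWhile (fun x => x == b) bs).length + 1 : Nat) : Int) + 1 := by
          push_cast; ring
        simp [h1]
    · have hb : (b == c) = false := by simp [h]
      rw [chgFrom_step]
      rw [List.dropWhile_cons_of_neg (by simp [h]), List.takeWhile_cons_of_neg (by simp [h])]
      simp [Ne.symm h]

-- B-side per-chain characterisation: the zipped columns are exactly the run triples
theorem zip_cols_eq_trips : ∀ (n : Nat) (c : Char) (cs : List Char), cs.length ≤ n → ∀ (i : Nat),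
    List.zipWith3 (fun a b c => (a, b, c))
      (c :: (chgFrom (c :: cs) i).map (·.2))
      ((i : Int) :: (chgFrom (c :: cs) i).map (·.1))
      ((chgFrom (c :: cs) i).map (·.1) ++ [((i + (c :: cs).length : Nat) : Int)])
    = trips (c :: cs) i := by
  intro n
  induction n with
  | zero =>
    intro c cs hlen i
    have : cs = [] := List.eq_nil_of_length_eq_zero (Nat.le_zero.mp hlen)
    subst this
    simp [chgFrom, PySem.List.enumerate_nil, trips, List.zipWith3]
  | succ n ih =>
    intro c cs hlen i
    rw [chgFrom_run, trips]
    cases hd : cs.dropWhile (· == c) with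
    | nil =>
      have hlen2 : cs.length = (cs.takeWhile (· == c)).length := by
        have := List.takeWhile_append_dropWhile (p := (· == c)) (l := cs)
        calc cs.length = (cs.takeWhile (· == c) ++ cs.dropWhile (· == c)).length := by rw [this]
        _ = _ := by simp [hd]
      simp only [List.map_nil, List.nil_append, List.zipWith3, List.length_cons]
      rw [trips]
      have hN : i + (cs.length + 1) = i + 1 + (cs.takeWhile (· == c)).length := by omega
      rw [hN]
    | cons d ds =>
      have hlen3 : cs.length = (cs.takeWhile (· == c)).length + (d :: ds).length := by
        have := List.takeWhile_append_dropWhile (p := (· == c)) (l := cs)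
        calc cs.length = (cs.takeWhile (· == c) ++ cs.dropWhile (· == c)).length := by rw [this]
        _ = _ := by simp [hd]
      have hds : ds.length ≤ n := by
        simp only [List.length_cons] at hlen3 hlen
        omega
      have hi : (i : Int) + ((cs.takeWhile (· == c)).length : Int) + 1
          = ((i + 1 + (cs.takeWhile (· == c)).length : Nat) : Int) := by push_cast; ring
      have hE : i + (c :: cs).length
          = (i + 1 + (cs.takeWhile (· == c)).length) + (d :: ds).length := by
        simp only [List.length_cons] at hlen3 ⊢
        omega
      simp only [List.map_cons, hi, hE]
      exact congrArg (List.cons _) (ih d ds hds _)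

-- extend across chains: foldl-append is flatMap
theorem foldl_extend (l : List String) (g : String → List (Char × Int × Int)) :
    ∀ acc, l.foldl (fun acc s => acc ++ g s) acc = acc ++ l.flatMap g := by
  induction l with
  | nil => intro acc; simp
  | cons x xs ih => intro acc; simp [List.foldl_cons, ih, List.flatMap_cons]

-- the per-chain stage of B computes exactly the run triples
theorem chainTriplesB_eq (s : List Char) : chainTriplesB s = trips s 0 := by
  cases s with
  | nil => rw [trips]; rfl
  | cons c cs =>
    have h := zip_cols_eq_trips cs.length c cs le_rfl 0
    unfold chainTriplesB chgB
    simpa [chgFrom] using h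

-- A's fold across chains enumerates the concatenated run triples
theorem foldA (l : List String) : ∀ (id : Int) (acc : List (Int × String × Int × Int)),
    l.foldl (fun st chain_ss => chainA chain_ss.toList 0 st.1 st.2) (id, acc)
      = (id + ((l.flatMap (fun s => trips s.toList 0)).length : Int),
         acc ++ (PySem.List.enumerate (l.flatMap (fun s => trips s.toList 0)) id).map
            (fun p => (p.1, String.singleton p.2.1, p.2.2.1, p.2.2.2))) := by
  induction l with
  | nil => intro id acc; simp [PySem.List.enumerate_nil]
  | cons x xs ih =>
    intro id acc
    rw [List.foldl_cons]
    show xs.foldl _ (chainA x.toList 0 id acc) = _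
    rw [chainA_eq_trips x.toList.length x.toList le_rfl 0 id acc, ih]
    simp only [List.flatMap_cons, PySem.List.enumerate_append, List.length_append,
      List.map_append, List.append_assoc, Prod.mk.injEq]
    exact ⟨by push_cast; ring, trivial⟩

-- ===== VERDICT (by name: the statement is the Claim_ definition above) =====
theorem parse_secondary_structure_chainwise_spec : Claim_equal_parse_secondary_structure_chainwise := by
  intro ss_chains _
  unfold Spec_parse_secondary_structure_chainwise
  unfold parse_secondary_structure_chainwise parse_secondary_structure_chainwise_alt
  rw [foldA, foldl_extend]
  have hg : (fun (s : String) => chainTriplesB s.toList) = (fun s => trips s.toList 0) :=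
    funext fun s => chainTriplesB_eq s.toList
  simp only [List.nil_append, hg]
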